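-- pv_equiv track=rewrite | github.com/johanromero5879/api-lightspot | app/flash/application/get_insights.py | get_periods_of_day
-- ===== SOURCE A (Python) =====
-- def get_periods_of_day(hours: list[dict[str, int]]):
--     periods_of_day = {
--         "Early morning": 0,
--         "Morning": 0,
--         "Afternoon": 0,
--         "Evening": 0
--     }
--
--     for item in hours:
--         if 0 <= item["hour"] < 6:
--             periods_of_day["Early morning"] += item["total"]
--             continue
--
--         if 6 <= item["hour"] < 12:
--             periods_of_day["Morning"] += item["total"]
--             continue
--
--         if 12 <= item["hour"] < 19:
--             periods_of_day["Afternoon"] += item["total"]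
--             continue
--
--         if 19 <= item["hour"] <= 23:
--             periods_of_day["Evening"] += item["total"]
--             continue
--
--     return periods_of_day
-- ===== SOURCE B (Python) =====
-- # Different decomposition: instead of one pass mutating a 4-key dict, build the
-- # result directly as a dict literal of four independent filtered sums (one staged
-- # pass per period). Same O(n) total cost, no mutation.
--
-- def get_periods_of_day(hours: list[dict[str, int]]):
--     return {
--         "Early morning": sum(item["total"] for item in hours if 0 <= item["hour"] < 6),
--         "Morning": sum(item["total"] for item in hours if 6 <= item["hour"] < 12),
--         "Afternoon": sum(item["total"] for item in hours if 12 <= item["hour"] < 19),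
--         "Evening": sum(item["total"] for item in hours if 19 <= item["hour"] <= 23),
--     }
-- ===== Notes on version B (the rewrite author's own statement) =====
-- stated objective: idiomatic
-- what changed: Replaces A's single pass that mutates a four-key accumulator dict with a dict literal of four independent filtered sums, one staged pass per period.
import Mathlib
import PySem

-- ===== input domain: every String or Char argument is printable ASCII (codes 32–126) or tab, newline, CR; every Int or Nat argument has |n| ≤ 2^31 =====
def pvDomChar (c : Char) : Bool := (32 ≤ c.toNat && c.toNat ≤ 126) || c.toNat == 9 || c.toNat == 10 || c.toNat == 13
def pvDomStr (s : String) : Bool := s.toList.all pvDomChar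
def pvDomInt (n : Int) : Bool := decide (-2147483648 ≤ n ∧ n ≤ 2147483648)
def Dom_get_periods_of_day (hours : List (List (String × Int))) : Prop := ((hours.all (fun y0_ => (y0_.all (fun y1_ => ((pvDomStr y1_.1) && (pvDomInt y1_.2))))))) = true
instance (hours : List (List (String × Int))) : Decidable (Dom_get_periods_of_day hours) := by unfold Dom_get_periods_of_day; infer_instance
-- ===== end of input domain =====

-- B builds the result as four independent filtered sums (one staged pass per period) instead of A's single pass mutating a 4-key dict (idiomatic; same cost).

-- ===== PORT A =====
-- one loop iteration of A: the if/continue cascade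
def pvAStep (d : PySem.Dict String Int) (item : List (String × Int)) : PySem.Dict String Int :=
  if 0 ≤ (PySem.Dict.mk item).getD "hour" 0 ∧ (PySem.Dict.mk item).getD "hour" 0 < 6 then
    d.modify "Early morning" 0 (· + (PySem.Dict.mk item).getD "total" 0)
  else if 6 ≤ (PySem.Dict.mk item).getD "hour" 0 ∧ (PySem.Dict.mk item).getD "hour" 0 < 12 then
    d.modify "Morning" 0 (· + (PySem.Dict.mk item).getD "total" 0)
  else if 12 ≤ (PySem.Dict.mk item).getD "hour" 0 ∧ (PySem.Dict.mk item).getD "hour" 0 < 19 then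
    d.modify "Afternoon" 0 (· + (PySem.Dict.mk item).getD "total" 0)
  else if 19 ≤ (PySem.Dict.mk item).getD "hour" 0 ∧ (PySem.Dict.mk item).getD "hour" 0 ≤ 23 then
    d.modify "Evening" 0 (· + (PySem.Dict.mk item).getD "total" 0)
  else d

def get_periods_of_day (hours : List (List (String × Int))) : List (String × Int) :=
  (hours.foldl pvAStep
    (PySem.Dict.mk [("Early morning", 0), ("Morning", 0), ("Afternoon", 0), ("Evening", 0)])).items

-- ===== PORT B =====
-- sum(item["total"] for item in hours if p(item["hour"]))
def pvBucket (hours : List (List (String × Int))) (p : Int → Prop) [DecidablePred p] : Int :=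
  hours.foldl (fun s item =>
    if p ((PySem.Dict.mk item).getD "hour" 0) then s + (PySem.Dict.mk item).getD "total" 0 else s) 0

def get_periods_of_day_alt (hours : List (List (String × Int))) : List (String × Int) :=
  [("Early morning", pvBucket hours (fun h => 0 ≤ h ∧ h < 6)),
   ("Morning", pvBucket hours (fun h => 6 ≤ h ∧ h < 12)),
   ("Afternoon", pvBucket hours (fun h => 12 ≤ h ∧ h < 19)),
   ("Evening", pvBucket hours (fun h => 19 ≤ h ∧ h ≤ 23))]

-- ===== PRECONDITION & SPEC =====
-- Pre_ excludes exactly the inputs on which the Python A raises KeyError: an item without an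
-- "hour" key, or an item whose hour lies in 0..23 but has no "total" key (B raises there too).
def Pre_get_periods_of_day (hours : List (List (String × Int))) : Prop :=
  ∀ item ∈ hours,
    (PySem.Dict.mk item).contains "hour" = true ∧
    ((0 ≤ (PySem.Dict.mk item).getD "hour" 0 ∧ (PySem.Dict.mk item).getD "hour" 0 ≤ 23) →
      (PySem.Dict.mk item).contains "total" = true)
instance (hours : List (List (String × Int))) : Decidable (Pre_get_periods_of_day hours) := by
  unfold Pre_get_periods_of_day; infer_instance

def pvWitness_get_periods_of_day : (List (List (String × Int))) :=
  [[("hour", 3), ("total", 5)], [("hour", 25)], [("hour", 20), ("total", 7)]]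

def Spec_get_periods_of_day (hours : List (List (String × Int))) (out : List (String × Int)) : Prop := out = get_periods_of_day_alt hours
instance (hours : List (List (String × Int))) (out : List (String × Int)) : Decidable (Spec_get_periods_of_day hours out) := by unfold Spec_get_periods_of_day; infer_instance

-- ===== CLAIM =====
def Claim_equal_get_periods_of_day : Prop := ∀ (hours : List (List (String × Int))), Dom_get_periods_of_day hours → Pre_get_periods_of_day hours → Spec_get_periods_of_day hours (get_periods_of_day hours)

-- ===== LEMMAS AND PROOFS =====

-- modify on the literal 4-key dict, one lemma per key
theorem pvModEM (a b c d v : Int) :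
    (PySem.Dict.mk [("Early morning", a), ("Morning", b), ("Afternoon", c), ("Evening", d)]).modify
      "Early morning" 0 (· + v) =
    PySem.Dict.mk [("Early morning", a + v), ("Morning", b), ("Afternoon", c), ("Evening", d)] := rfl

theorem pvModM (a b c d v : Int) :
    (PySem.Dict.mk [("Early morning", a), ("Morning", b), ("Afternoon", c), ("Evening", d)]).modify
      "Morning" 0 (· + v) =
    PySem.Dict.mk [("Early morning", a), ("Morning", b + v), ("Afternoon", c), ("Evening", d)] := rfl

theorem pvModAf (a b c d v : Int) :
    (PySem.Dict.mk [("Early morning", a), ("Morning", b), ("Afternoon", c), ("Evening", d)]).modify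
      "Afternoon" 0 (· + v) =
    PySem.Dict.mk [("Early morning", a), ("Morning", b), ("Afternoon", c + v), ("Evening", d)] := rfl

theorem pvModEv (a b c d v : Int) :
    (PySem.Dict.mk [("Early morning", a), ("Morning", b), ("Afternoon", c), ("Evening", d)]).modify
      "Evening" 0 (· + v) =
    PySem.Dict.mk [("Early morning", a), ("Morning", b), ("Afternoon", c), ("Evening", d + v)] := rfl

-- one A-step on the 4-key dict adds each item's guarded contribution to every bucket
theorem pvAStep_eq (x : List (String × Int)) (a b c d : Int) :
    pvAStep (PySem.Dict.mk [("Early morning", a), ("Morning", b), ("Afternoon", c), ("Evening", d)]) x =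
    PySem.Dict.mk
      [("Early morning", a + (if 0 ≤ (PySem.Dict.mk x).getD "hour" 0 ∧ (PySem.Dict.mk x).getD "hour" 0 < 6 then (PySem.Dict.mk x).getD "total" 0 else 0)),
       ("Morning", b + (if 6 ≤ (PySem.Dict.mk x).getD "hour" 0 ∧ (PySem.Dict.mk x).getD "hour" 0 < 12 then (PySem.Dict.mk x).getD "total" 0 else 0)),
       ("Afternoon", c + (if 12 ≤ (PySem.Dict.mk x).getD "hour" 0 ∧ (PySem.Dict.mk x).getD "hour" 0 < 19 then (PySem.Dict.mk x).getD "total" 0 else 0)),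
       ("Evening", d + (if 19 ≤ (PySem.Dict.mk x).getD "hour" 0 ∧ (PySem.Dict.mk x).getD "hour" 0 ≤ 23 then (PySem.Dict.mk x).getD "total" 0 else 0))] := by
  unfold pvAStep
  split_ifs <;>
    first
      | (exfalso; omega)
      | (rw [pvModEM]; simp)
      | (rw [pvModM]; simp)
      | (rw [pvModAf]; simp)
      | (rw [pvModEv]; simp)
      | simp

-- shifting pvBucket's accumulator
theorem pvBucket_shift (hours : List (List (String × Int))) (p : Int → Prop) [DecidablePred p]
    (a : Int) :
    hours.foldl (fun s item =>
      if p ((PySem.Dict.mk item).getD "hour" 0) then s + (PySem.Dict.mk item).getD "total" 0 else s) a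
      = a + pvBucket hours p := by
  unfold pvBucket
  induction hours generalizing a with
  | nil => simp
  | cons x xs ih =>
      simp only [List.foldl_cons]
      split
      · rw [ih]
        conv_rhs => rw [ih]
        ring
      · exact ih a

-- pvBucket on a cons peels off the head's guarded contribution
theorem pvBucket_cons (x : List (String × Int)) (xs : List (List (String × Int)))
    (p : Int → Prop) [DecidablePred p] :
    pvBucket (x :: xs) p =
      (if p ((PySem.Dict.mk x).getD "hour" 0) then (PySem.Dict.mk x).getD "total" 0 else 0) +
        pvBucket xs p := by
  unfold pvBucket
  rw [List.foldl_cons, pvBucket_shift]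
  split <;> simp [pvBucket]

-- the loop invariant: A's fold over the 4-key dict computes the four bucket sums
theorem pvMain (hours : List (List (String × Int))) (a b c d : Int) :
    (hours.foldl pvAStep
      (PySem.Dict.mk [("Early morning", a), ("Morning", b), ("Afternoon", c), ("Evening", d)])).items =
    [("Early morning", a + pvBucket hours (fun h => 0 ≤ h ∧ h < 6)),
     ("Morning", b + pvBucket hours (fun h => 6 ≤ h ∧ h < 12)),
     ("Afternoon", c + pvBucket hours (fun h => 12 ≤ h ∧ h < 19)),
     ("Evening", d + pvBucket hours (fun h => 19 ≤ h ∧ h ≤ 23))] := by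
  induction hours generalizing a b c d with
  | nil => simp [pvBucket]
  | cons x xs ih =>
      rw [List.foldl_cons, pvAStep_eq, ih,
        pvBucket_cons, pvBucket_cons, pvBucket_cons, pvBucket_cons]
      simp [add_assoc]

-- ===== VERDICT =====
theorem get_periods_of_day_spec : Claim_equal_get_periods_of_day := by
  intro hours _ _
  unfold Spec_get_periods_of_day get_periods_of_day get_periods_of_day_alt
  rw [pvMain]
  simp
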